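-- pv_equiv track=rewrite | github.com/vosslab/biology-problems | inheritance-problems/poisson_flies.py | print_distribution_table
-- ===== SOURCE A (Python) =====
-- def geno2pheno(genotype):
-- 	if genotype.startswith('+'):
-- 		phenotype = "red"
-- 	else:
-- 		phenotype = "white"
-- 	if '-' in genotype:
-- 		phenotype += " male"
-- 	else:
-- 		phenotype += " female"
-- 	return phenotype
--
-- def print_distribution_table(distribution):
-- 	keys = list(distribution.keys())
-- 	keys.sort()
-- 	pcount = {}
-- 	for key in keys:
-- 		phenotype = geno2pheno(key)
-- 		pcount[phenotype] = pcount.get(phenotype,0) + distribution[key]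
--
-- 	pkeys = list(pcount.keys())
-- 	pkeys.sort()
-- 	mystr = '<table cellpadding="2" cellspacing="2" style="border-collapse: collapse; text-align:center; border: 1px solid black; font-size: 14px;">'
-- 	mystr += "<tr><th>phenotype</th><th>female &female;</th><th>male &male;</th></tr> "
-- 	mystr += "<tr><td><span style='color: darkred;'>red-eyed (wildtype)</span></td> "
-- 	mystr +=   f"<td align='center'>{pcount.get('red female', 0)}</td>"
-- 	mystr +=   f"<td align='center'>{pcount.get('red male', 0)}</td></tr> "
-- 	mystr += "<tr><td>white-eyed (mutant)</td> "
-- 	mystr +=   f"<td align='center'>{pcount.get('white female', 0)}</td>"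
-- 	mystr +=   f"<td align='center'>{pcount.get('white male', 0)}</td></tr> "
-- 	mystr += "</table><br/>"
-- 	return mystr
-- ===== SOURCE B (Python) =====
-- def print_distribution_table(distribution):
-- 	red_female = sum(v for k, v in distribution.items() if k.startswith('+') and '-' not in k)
-- 	red_male = sum(v for k, v in distribution.items() if k.startswith('+') and '-' in k)
-- 	white_female = sum(v for k, v in distribution.items() if not k.startswith('+') and '-' not in k)
-- 	white_male = sum(v for k, v in distribution.items() if not k.startswith('+') and '-' in k)
-- 	return (
-- 		'<table cellpadding="2" cellspacing="2" style="border-collapse: collapse; text-align:center; border: 1px solid black; font-size: 14px;">'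
-- 		"<tr><th>phenotype</th><th>female &female;</th><th>male &male;</th></tr> "
-- 		"<tr><td><span style='color: darkred;'>red-eyed (wildtype)</span></td> "
-- 		f"<td align='center'>{red_female}</td>"
-- 		f"<td align='center'>{red_male}</td></tr> "
-- 		"<tr><td>white-eyed (mutant)</td> "
-- 		f"<td align='center'>{white_female}</td>"
-- 		f"<td align='center'>{white_male}</td></tr> "
-- 		"</table><br/>"
-- 	)
-- ===== Notes on version B (the rewrite author's own statement) =====
-- stated objective: simpler
-- what changed: Replaces the sort + aggregating dict pass + geno2pheno helper with four independent filtered sums over the items, one per table cell, interpolated directly into the HTML template.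
import Mathlib
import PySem

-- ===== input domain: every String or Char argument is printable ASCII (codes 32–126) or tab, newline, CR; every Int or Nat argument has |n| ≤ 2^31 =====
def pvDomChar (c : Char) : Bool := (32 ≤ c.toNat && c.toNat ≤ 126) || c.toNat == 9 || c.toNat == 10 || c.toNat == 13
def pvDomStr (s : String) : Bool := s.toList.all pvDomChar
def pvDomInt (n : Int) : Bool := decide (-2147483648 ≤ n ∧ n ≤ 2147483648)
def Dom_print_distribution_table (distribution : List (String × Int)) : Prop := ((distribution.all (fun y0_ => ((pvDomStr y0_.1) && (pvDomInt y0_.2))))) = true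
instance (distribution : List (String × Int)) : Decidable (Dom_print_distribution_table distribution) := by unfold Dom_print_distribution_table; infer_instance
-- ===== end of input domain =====

-- B replaces the sort + aggregating dict pass with four independent filtered sums, one per table cell (simpler).

-- ===== PORT A =====
def geno2pheno (genotype : String) : String :=
  let phenotype := if PySem.Str.startswith genotype "+" then "red" else "white"
  if PySem.Str.isIn "-" genotype then phenotype ++ " male" else phenotype ++ " female"

def print_distribution_table (distribution : List (String × Int)) : String :=
  let keys := PySem.List.sorted (distribution.map Prod.fst) (fun x => x) false
  let pcount : PySem.Dict String Int :=
    keys.foldl (fun pc key =>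
      let phenotype := geno2pheno key
      pc.insert phenotype (pc.getD phenotype 0 + ((PySem.Dict.mk distribution).get? key).getD 0))
      PySem.Dict.empty
  let _pkeys := PySem.List.sorted pcount.keys (fun x => x) false
  let mystr := "<table cellpadding=\"2\" cellspacing=\"2\" style=\"border-collapse: collapse; text-align:center; border: 1px solid black; font-size: 14px;\">"
  let mystr := mystr ++ "<tr><th>phenotype</th><th>female &female;</th><th>male &male;</th></tr> "
  let mystr := mystr ++ "<tr><td><span style='color: darkred;'>red-eyed (wildtype)</span></td> "
  let mystr := mystr ++ ("<td align='center'>" ++ PySem.Int.toStr (pcount.getD "red female" 0) ++ "</td>")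
  let mystr := mystr ++ ("<td align='center'>" ++ PySem.Int.toStr (pcount.getD "red male" 0) ++ "</td></tr> ")
  let mystr := mystr ++ "<tr><td>white-eyed (mutant)</td> "
  let mystr := mystr ++ ("<td align='center'>" ++ PySem.Int.toStr (pcount.getD "white female" 0) ++ "</td>")
  let mystr := mystr ++ ("<td align='center'>" ++ PySem.Int.toStr (pcount.getD "white male" 0) ++ "</td></tr> ")
  let mystr := mystr ++ "</table><br/>"
  mystr

-- ===== PORT B =====
def print_distribution_table_alt (distribution : List (String × Int)) : String :=
  let red_female := ((distribution.filter (fun kv => PySem.Str.startswith kv.1 "+" && !PySem.Str.isIn "-" kv.1)).map Prod.snd).sum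
  let red_male := ((distribution.filter (fun kv => PySem.Str.startswith kv.1 "+" && PySem.Str.isIn "-" kv.1)).map Prod.snd).sum
  let white_female := ((distribution.filter (fun kv => !PySem.Str.startswith kv.1 "+" && !PySem.Str.isIn "-" kv.1)).map Prod.snd).sum
  let white_male := ((distribution.filter (fun kv => !PySem.Str.startswith kv.1 "+" && PySem.Str.isIn "-" kv.1)).map Prod.snd).sum
  "<table cellpadding=\"2\" cellspacing=\"2\" style=\"border-collapse: collapse; text-align:center; border: 1px solid black; font-size: 14px;\">"
    ++ "<tr><th>phenotype</th><th>female &female;</th><th>male &male;</th></tr> "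
    ++ "<tr><td><span style='color: darkred;'>red-eyed (wildtype)</span></td> "
    ++ "<td align='center'>" ++ PySem.Int.toStr red_female ++ "</td>"
    ++ "<td align='center'>" ++ PySem.Int.toStr red_male ++ "</td></tr> "
    ++ "<tr><td>white-eyed (mutant)</td> "
    ++ "<td align='center'>" ++ PySem.Int.toStr white_female ++ "</td>"
    ++ "<td align='center'>" ++ PySem.Int.toStr white_male ++ "</td></tr> "
    ++ "</table><br/>"

-- ===== PRECONDITION & SPEC =====
-- Pre_ excludes association lists with duplicate keys: they cannot arise from a Python dict
-- argument, so neither port's reading of them reflects any behaviour of the Python programs.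
def Pre_print_distribution_table (distribution : List (String × Int)) : Prop :=
  (distribution.map Prod.fst).Nodup
instance (distribution : List (String × Int)) : Decidable (Pre_print_distribution_table distribution) := by unfold Pre_print_distribution_table; infer_instance
def pvWitness_print_distribution_table : (List (String × Int)) := [("+a", 3), ("a-b", 2)]

def Spec_print_distribution_table (distribution : List (String × Int)) (out : String) : Prop := out = print_distribution_table_alt distribution
instance (distribution : List (String × Int)) (out : String) : Decidable (Spec_print_distribution_table distribution out) := by unfold Spec_print_distribution_table; infer_instance

-- ===== CLAIM (what is proved, stated in full; the proofs are below) =====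
def Claim_equal_print_distribution_table : Prop := ∀ (distribution : List (String × Int)), Dom_print_distribution_table distribution → Pre_print_distribution_table distribution → Spec_print_distribution_table distribution (print_distribution_table distribution)

-- ===== LEMMAS AND PROOFS =====

-- the summand A's loop adds for key k toward phenotype p
theorem pv_fold_getD (distribution : List (String × Int)) (ks : List String) (d : PySem.Dict String Int) (p : String) :
    (ks.foldl (fun pc key =>
        pc.insert (geno2pheno key) (pc.getD (geno2pheno key) 0 + ((PySem.Dict.mk distribution).get? key).getD 0)) d).getD p 0
      = d.getD p 0 + (ks.map (fun k => if geno2pheno k = p then ((PySem.Dict.mk distribution).get? k).getD 0 else 0)).sum := by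
  induction ks generalizing d with
  | nil => simp
  | cons k t ih =>
    simp only [List.foldl_cons, List.map_cons, List.sum_cons, ih, PySem.Dict.getD_insert]
    by_cases h : geno2pheno k = p
    · simp [h]; ring
    · simp [h, Ne.symm h]

-- geno2pheno characterised by the two boolean tests
theorem pv_g1 (k : String) : geno2pheno k = "red female" ↔ (PySem.Str.startswith k "+" && !PySem.Str.isIn "-" k) = true := by
  by_cases h1 : PySem.Str.startswith k "+" = true <;> by_cases h2 : PySem.Str.isIn "-" k = true <;>
    simp only [Bool.not_eq_true] at h1 h2 <;> simp only [geno2pheno, h1, h2] <;> decide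

theorem pv_g2 (k : String) : geno2pheno k = "red male" ↔ (PySem.Str.startswith k "+" && PySem.Str.isIn "-" k) = true := by
  by_cases h1 : PySem.Str.startswith k "+" = true <;> by_cases h2 : PySem.Str.isIn "-" k = true <;>
    simp only [Bool.not_eq_true] at h1 h2 <;> simp only [geno2pheno, h1, h2] <;> decide

theorem pv_g3 (k : String) : geno2pheno k = "white female" ↔ (!PySem.Str.startswith k "+" && !PySem.Str.isIn "-" k) = true := by
  by_cases h1 : PySem.Str.startswith k "+" = true <;> by_cases h2 : PySem.Str.isIn "-" k = true <;>
    simp only [Bool.not_eq_true] at h1 h2 <;> simp only [geno2pheno, h1, h2] <;> decide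

theorem pv_g4 (k : String) : geno2pheno k = "white male" ↔ (!PySem.Str.startswith k "+" && PySem.Str.isIn "-" k) = true := by
  by_cases h1 : PySem.Str.startswith k "+" = true <;> by_cases h2 : PySem.Str.isIn "-" k = true <;>
    simp only [Bool.not_eq_true] at h1 h2 <;> simp only [geno2pheno, h1, h2] <;> decide

-- with distinct keys, summing first-match lookups over the key list is summing the values of the matching pairs
theorem pv_sum_lookup (l : List (String × Int)) (P : String → Bool) (h : (l.map Prod.fst).Nodup) :
    ((l.map Prod.fst).map (fun k => if P k = true then ((PySem.Dict.mk l).get? k).getD 0 else 0)).sum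
      = ((l.filter (fun kv => P kv.1)).map Prod.snd).sum := by
  induction l with
  | nil => simp
  | cons kv t ih =>
    obtain ⟨k, v⟩ := kv
    simp only [List.map_cons, List.nodup_cons, List.mem_map] at h ⊢
    obtain ⟨hk, ht⟩ := h
    have hhead : ((PySem.Dict.mk ((k, v) :: t)).get? k).getD 0 = v := by
      simp [PySem.Dict.get?_mk_cons]
    have htail : (t.map Prod.fst).map (fun x => if P x = true then ((PySem.Dict.mk ((k, v) :: t)).get? x).getD 0 else 0)
        = (t.map Prod.fst).map (fun x => if P x = true then ((PySem.Dict.mk t).get? x).getD 0 else 0) := by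
      apply List.map_congr_left
      intro x hx
      have hne : (k == x) = false := by
        rcases List.mem_map.mp hx with ⟨p, hp, hpx⟩
        have : k ≠ x := by
          intro hkx; exact hk ⟨p, hp, by rw [← hkx] at hpx; exact hpx⟩
        simpa using this
      simp [PySem.Dict.get?_mk_cons, hne]
    simp only [List.sum_cons, htail, ih ht, List.filter_cons]
    by_cases hp : P k = true
    · simp [hp, hhead]
    · simp [hp]

set_option maxRecDepth 4096 in
theorem print_distribution_table_spec : Claim_equal_print_distribution_table := by
  intro distribution _ hpre
  unfold Pre_print_distribution_table at hpre
  unfold Spec_print_distribution_table print_distribution_table print_distribution_table_alt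
  simp only [pv_fold_getD, PySem.Dict.getD_empty, zero_add]
  have hperm : ∀ (f : String → Int),
      ((PySem.List.sorted (distribution.map Prod.fst) (fun x => x) false).map f).sum
        = ((distribution.map Prod.fst).map f).sum := fun f =>
    ((PySem.List.sorted_perm (distribution.map Prod.fst) (fun x => x) false).map f).sum_eq
  simp only [hperm, pv_g1, pv_g2, pv_g3, pv_g4]
  rw [pv_sum_lookup distribution (fun k => PySem.Str.startswith k "+" && !PySem.Str.isIn "-" k) hpre,
      pv_sum_lookup distribution (fun k => PySem.Str.startswith k "+" && PySem.Str.isIn "-" k) hpre,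
      pv_sum_lookup distribution (fun k => !PySem.Str.startswith k "+" && !PySem.Str.isIn "-" k) hpre,
      pv_sum_lookup distribution (fun k => !PySem.Str.startswith k "+" && PySem.Str.isIn "-" k) hpre]
  rw [← String.toList_inj]
  simp [String.toList_append]
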